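-- pv_equiv track=rewrite | github.com/int8/elemelek | elemelek/index.py | get_samples_per_cluster
-- ===== SOURCE A (Python) =====
-- import math
-- from typing import List, Sequence, Set
--
-- def get_samples_per_cluster(
--     clustering: List["InstructionsCluster"], k: int
-- ) -> List[int]:
--     num_clusters = len(clustering)
--     ideal_samples_per_cluster = math.floor(k / num_clusters)
--
--     num_per_cluster = [
--         min(len(cluster), ideal_samples_per_cluster) for cluster in clustering
--     ]
--
--     total_samples_from_uniform = sum(num_per_cluster)
--
--     remaining_samples = k - total_samples_from_uniform
--
--     while remaining_samples > 0:
--         for i, cluster in enumerate(clustering):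
--             if num_per_cluster[i] < len(cluster) and remaining_samples > 0:
--                 num_per_cluster[i] += 1
--                 remaining_samples -= 1
--             if remaining_samples <= 0:
--                 break
--
--     return num_per_cluster
-- ===== SOURCE B (Python) =====
-- def get_samples_per_cluster(clustering, k):
--     n = len(clustering)
--     caps = [len(c) for c in clustering]
--     base = k // n
--
--     def filled(level):
--         return sum(min(c, level) for c in caps)
--
--     # binary search the highest water level whose total fill does not exceed k
--     lo, hi = base, max([base] + caps)
--     while lo < hi:
--         mid = (lo + hi + 1) // 2
--         if filled(mid) <= k:
--             lo = mid
--         else: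
--             hi = mid - 1
--
--     rem = k - filled(lo)
--     out = []
--     for c in caps:
--         if c > lo and rem > 0:
--             out.append(min(c, lo) + 1)
--             rem -= 1
--         else:
--             out.append(min(c, lo))
--     return out
-- ===== Notes on version B (the rewrite author's own statement) =====
-- stated objective: alternative
-- what changed: Replaces A's repeated round-robin while-loop over the clusters by a binary search for the water-filling level followed by a single assignment pass in index order.
import Mathlib
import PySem

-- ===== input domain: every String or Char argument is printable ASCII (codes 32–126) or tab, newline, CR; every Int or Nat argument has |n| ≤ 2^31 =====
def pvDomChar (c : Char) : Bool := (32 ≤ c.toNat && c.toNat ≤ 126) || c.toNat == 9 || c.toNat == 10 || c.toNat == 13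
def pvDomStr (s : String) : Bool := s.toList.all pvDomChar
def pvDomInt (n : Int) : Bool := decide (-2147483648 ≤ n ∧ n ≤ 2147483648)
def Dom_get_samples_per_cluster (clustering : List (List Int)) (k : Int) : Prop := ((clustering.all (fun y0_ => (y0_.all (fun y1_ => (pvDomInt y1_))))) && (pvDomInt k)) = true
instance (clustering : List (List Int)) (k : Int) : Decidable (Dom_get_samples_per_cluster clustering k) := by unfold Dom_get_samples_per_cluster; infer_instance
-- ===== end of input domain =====

-- B replaces A's round-robin while-loop by a binary search for the water-filling level
-- followed by one assignment pass; equivalence of the RETURN value is proved on Pre_.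

-- ===== PORT A =====
-- one pass of A's inner 'for i, cluster in enumerate(clustering)' (num_per_cluster is walked in step with clustering)
def pvPassA : List (List Int) → List Int → Int → List Int × Int
  | c :: cl, x :: a, rem =>
      if x < (c.length : Int) ∧ 0 < rem then
        if rem - 1 ≤ 0 then ((x + 1) :: a, rem - 1)           -- 'break' after the increment
        else
          let p := pvPassA cl a (rem - 1)
          ((x + 1) :: p.1, p.2)
      else
        if rem ≤ 0 then (x :: a, rem)                          -- 'break' without increment
        else
          let p := pvPassA cl a rem
          (x :: p.1, p.2)
  | _, a, rem => (a, rem)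

-- the 'while remaining_samples > 0' loop; fuel bounds the pass count (each pass that A
-- performs on a terminating input strictly decreases 'remaining', so remaining.toNat suffices)
def pvWhileA (cl : List (List Int)) : Nat → List Int → Int → List Int
  | 0, a, _ => a
  | fuel + 1, a, rem =>
      if 0 < rem then
        let p := pvPassA cl a rem
        pvWhileA cl fuel p.1 p.2
      else a

def get_samples_per_cluster (clustering : List (List Int)) (k : Int) : List Int :=
  let numClusters : Int := clustering.length
  -- math.floor(k / num_clusters): exact as floor division on the admitted integer range
  let ideal := PySem.Int.floordiv k numClusters
  let numPerCluster := clustering.map (fun c => min (c.length : Int) ideal)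
  let totalFromUniform := numPerCluster.sum
  let remaining := k - totalFromUniform
  pvWhileA clustering remaining.toNat numPerCluster remaining

-- ===== PORT B =====
def pvFilled (caps : List Int) (level : Int) : Int := (caps.map (fun c => min c level)).sum

-- Source B's 'while lo < hi' binary search; fuel bounds the iteration count
def pvBSearch (caps : List Int) (k : Int) : Nat → Int → Int → Int
  | 0, lo, _ => lo
  | fuel + 1, lo, hi =>
      if lo < hi then
        let mid := PySem.Int.floordiv (lo + hi + 1) 2
        if pvFilled caps mid ≤ k then pvBSearch caps k fuel mid hi
        else pvBSearch caps k fuel lo (mid - 1)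
      else lo

-- Source B's final 'for c in caps' pass
def pvAssign : List Int → Int → Int → List Int
  | [], _, _ => []
  | c :: cs, lo, rem =>
      if lo < c ∧ 0 < rem then (min c lo + 1) :: pvAssign cs lo (rem - 1)
      else min c lo :: pvAssign cs lo rem

def get_samples_per_cluster_alt (clustering : List (List Int)) (k : Int) : List Int :=
  let caps := clustering.map (fun c => (c.length : Int))
  let base := PySem.Int.floordiv k (clustering.length : Int)
  let hi := caps.foldl max base           -- max([base] + caps)
  let lo := pvBSearch caps k (hi - base).toNat base hi
  let rem := k - pvFilled caps lo
  pvAssign caps lo rem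

-- ===== PRECONDITION & SPEC =====
-- Pre_ excludes only inputs on which A does not return: clustering = [] (ZeroDivisionError)
-- and k greater than the total number of elements (A's while-loop then never terminates).
def Pre_get_samples_per_cluster (clustering : List (List Int)) (k : Int) : Prop :=
  clustering ≠ [] ∧ k ≤ (clustering.map (fun c => (c.length : Int))).sum
instance (clustering : List (List Int)) (k : Int) : Decidable (Pre_get_samples_per_cluster clustering k) := by unfold Pre_get_samples_per_cluster; infer_instance

def pvWitness_get_samples_per_cluster : List (List Int) × Int := ([[1, 2, 3], [4]], 4)

def Spec_get_samples_per_cluster (clustering : List (List Int)) (k : Int) (out : List Int) : Prop := out = get_samples_per_cluster_alt clustering k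
instance (clustering : List (List Int)) (k : Int) (out : List Int) : Decidable (Spec_get_samples_per_cluster clustering k out) := by unfold Spec_get_samples_per_cluster; infer_instance

-- ===== CLAIM (what is proved, stated in full; the proofs are below) =====
def Claim_equal_get_samples_per_cluster : Prop := ∀ (clustering : List (List Int)) (k : Int), Dom_get_samples_per_cluster clustering k → Pre_get_samples_per_cluster clustering k → Spec_get_samples_per_cluster clustering k (get_samples_per_cluster clustering k)

-- ===== LEMMAS AND PROOFS =====

-- capacities of the clusters, and the list 'num_per_cluster' A starts from at level L
def pvCaps (cl : List (List Int)) : List Int := cl.map (fun c => (c.length : Int))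
def pvMins (cl : List (List Int)) (L : Int) : List Int := cl.map (fun c => min (c.length : Int) L)
-- number of clusters still unsaturated at level L
def pvU (cs : List Int) (L : Int) : Int := (cs.countP (fun c => decide (L < c)) : Int)
-- the loop's stopping condition at level L (given filled ≤ k)
def pvStop (cs : List Int) (k L : Int) : Prop := k - pvFilled cs L < pvU cs L ∨ pvU cs L = 0

theorem pvU_nil (L : Int) : pvU [] L = 0 := rfl
theorem pvU_cons (c : Int) (cs : List Int) (L : Int) :
    pvU (c :: cs) L = (if L < c then 1 else 0) + pvU cs L := by
  by_cases h : L < c <;> simp [pvU, List.countP_cons, h] <;> omega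

theorem pvU_nonneg (cs : List Int) (L : Int) : 0 ≤ pvU cs L := by
  simp [pvU]

theorem pvFilled_nil (L : Int) : pvFilled [] L = 0 := rfl
theorem pvFilled_cons (c : Int) (cs : List Int) (L : Int) :
    pvFilled (c :: cs) L = min c L + pvFilled cs L := by
  simp [pvFilled]

theorem pvMins_eq (cl : List (List Int)) (L : Int) :
    pvMins cl L = (pvCaps cl).map (fun c => min c L) := by
  simp [pvMins, pvCaps, List.map_map]

theorem pvFilled_succ (cs : List Int) (L : Int) :
    pvFilled cs (L + 1) = pvFilled cs L + pvU cs L := by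
  induction cs with
  | nil => simp [pvFilled_nil, pvU_nil]
  | cons c cs ih =>
    rw [pvFilled_cons, pvFilled_cons, pvU_cons, ih]
    split_ifs with h <;> omega

theorem pvFilled_mono (cs : List Int) {L L' : Int} (h : L ≤ L') :
    pvFilled cs L ≤ pvFilled cs L' := by
  induction cs with
  | nil => simp [pvFilled_nil]
  | cons c cs ih => rw [pvFilled_cons, pvFilled_cons]; have := min_le_min_left c h; omega

theorem pvMap_min_of_u_zero {cs : List Int} {L : Int} (h : pvU cs L = 0) {L' : Int} (hL : L ≤ L') :
    cs.map (fun c => min c L') = cs := by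
  induction cs with
  | nil => simp
  | cons c cs ih =>
    rw [pvU_cons] at h
    have hn := pvU_nonneg cs L
    have hc : ¬ L < c := by by_contra hc; simp [hc] at h; omega
    have h0 : pvU cs L = 0 := by split_ifs at h <;> omega
    simp only [List.map_cons, ih h0]
    have : min c L' = c := by omega
    rw [this]

theorem pvFilled_of_u_zero {cs : List Int} {L : Int} (h : pvU cs L = 0) {L' : Int} (hL : L ≤ L') :
    pvFilled cs L' = cs.sum := by
  rw [pvFilled, pvMap_min_of_u_zero h hL]

theorem pvAssign_nonpos (cs : List Int) (L : Int) {r : Int} (hr : r ≤ 0) :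
    pvAssign cs L r = cs.map (fun c => min c L) := by
  induction cs generalizing r with
  | nil => simp [pvAssign]
  | cons c cs ih =>
    rw [pvAssign]
    have : ¬ (L < c ∧ 0 < r) := by omega
    simp [this, ih hr]

theorem pvAssign_full (cs : List Int) (L : Int) {r : Int} (hr : pvU cs L ≤ r) :
    pvAssign cs L r = cs.map (fun c => min c (L + 1)) := by
  induction cs generalizing r with
  | nil => simp [pvAssign]
  | cons c cs ih =>
    rw [pvU_cons] at hr
    have hn := pvU_nonneg cs L
    rw [pvAssign]
    by_cases hc : L < c
    · simp only [hc, if_pos] at hr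
      have hpos : 0 < r := by omega
      simp only [hc, hpos, and_self, if_pos, List.map_cons]
      rw [ih (by omega)]
      have : min c L + 1 = min c (L + 1) := by omega
      rw [this]
    · have : ¬ (L < c ∧ 0 < r) := by tauto
      simp only [this, if_neg, not_false_iff, List.map_cons]
      simp only [hc, if_neg, not_false_iff] at hr
      rw [ih (by omega)]
      have : min c L = min c (L + 1) := by omega
      rw [this]

-- one full pass of A over the state 'min(cap, L)' acts exactly like Source B's assignment pass
theorem pvPassA_spec (cl : List (List Int)) (L : Int) :
    ∀ r : Int, 0 < r →
      pvPassA cl (pvMins cl L) r = (pvAssign (pvCaps cl) L r, r - min r (pvU (pvCaps cl) L)) := by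
  induction cl with
  | nil => intro r hr; simp [pvMins, pvCaps, pvPassA, pvAssign, pvU_nil]; omega
  | cons c cl ih =>
    intro r hr
    have hn := pvU_nonneg (pvCaps cl) L
    simp only [pvMins, pvCaps, List.map_cons] at *
    rw [pvPassA]
    by_cases hc : L < (c.length : Int)
    · have hcond : min (c.length : Int) L < (c.length : Int) ∧ 0 < r := ⟨by omega, hr⟩
      rw [if_pos hcond]
      by_cases h1 : r - 1 ≤ 0
      · rw [if_pos h1, pvAssign, if_pos ⟨hc, hr⟩, pvAssign_nonpos _ _ (by omega : r - 1 ≤ 0)]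
        rw [pvU_cons, if_pos hc]
        simp only [Prod.mk.injEq, List.map_map, Function.comp_def]
        refine ⟨by simp, by omega⟩
      · rw [if_neg h1, ih (r - 1) (by omega)]
        rw [pvAssign, if_pos ⟨hc, hr⟩, pvU_cons, if_pos hc]
        simp only [Prod.mk.injEq]
        refine ⟨by simp, by omega⟩
    · have hcond : ¬ (min (c.length : Int) L < (c.length : Int) ∧ 0 < r) := by
        intro h; exact absurd h.1 (by omega)
      rw [if_neg hcond, if_neg (by omega : ¬ r ≤ 0), ih r hr]
      rw [pvAssign, if_neg (by intro h; exact hc h.1), pvU_cons, if_neg hc]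
      simp only [Prod.mk.injEq]
      refine ⟨by simp, by omega⟩

-- the while-loop returns its state untouched once remaining ≤ 0
theorem pvWhileA_nonpos (cl : List (List Int)) (fuel : Nat) (a : List Int) {rem : Int}
    (h : rem ≤ 0) : pvWhileA cl fuel a rem = a := by
  cases fuel with
  | zero => rfl
  | succ f => rw [pvWhileA, if_neg (by omega)]

theorem pvFilled_le_len_mul (cs : List Int) (L : Int) :
    pvFilled cs L ≤ (cs.length : Int) * L := by
  induction cs with
  | nil => simp [pvFilled_nil]
  | cons c cs ih =>
    rw [pvFilled_cons, List.length_cons]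
    push_cast
    rw [add_mul, one_mul]
    have h1 : min c L ≤ L := min_le_right c L
    omega

-- A's while-loop, started at level L, ends in an assignment at some stopping level
theorem pvWhileA_spec (cl : List (List Int)) (k : Int) :
    ∀ (fuel : Nat) (L : Int), pvFilled (pvCaps cl) L ≤ k → k ≤ (pvCaps cl).sum →
      (k - pvFilled (pvCaps cl) L).toNat ≤ fuel →
      ∃ Lf, L ≤ Lf ∧ pvFilled (pvCaps cl) Lf ≤ k ∧ pvStop (pvCaps cl) k Lf ∧
        pvWhileA cl fuel (pvMins cl L) (k - pvFilled (pvCaps cl) L) =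
          pvAssign (pvCaps cl) Lf (k - pvFilled (pvCaps cl) Lf) := by
  intro fuel
  induction fuel with
  | zero =>
    intro L hL hks hfuel
    have hr0 : k - pvFilled (pvCaps cl) L = 0 := by omega
    refine ⟨L, le_rfl, hL, ?_, ?_⟩
    · by_cases hu : pvU (pvCaps cl) L = 0
      · exact Or.inr hu
      · exact Or.inl (by have := pvU_nonneg (pvCaps cl) L; omega)
    · rw [hr0, pvWhileA, pvAssign_nonpos _ _ le_rfl, pvMins_eq]
  | succ fuel ih =>
    intro L hL hks hfuel
    by_cases hr : k - pvFilled (pvCaps cl) L ≤ 0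
    · have hr0 : k - pvFilled (pvCaps cl) L = 0 := by omega
      refine ⟨L, le_rfl, hL, ?_, ?_⟩
      · by_cases hu : pvU (pvCaps cl) L = 0
        · exact Or.inr hu
        · exact Or.inl (by have := pvU_nonneg (pvCaps cl) L; omega)
      · rw [pvWhileA_nonpos cl _ _ hr, hr0, pvAssign_nonpos _ _ le_rfl, pvMins_eq]
    · have hrpos : 0 < k - pvFilled (pvCaps cl) L := by omega
      rw [pvWhileA, if_pos hrpos, pvPassA_spec cl L _ hrpos]
      by_cases hlt : k - pvFilled (pvCaps cl) L < pvU (pvCaps cl) L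
      · have hmin : k - pvFilled (pvCaps cl) L -
            min (k - pvFilled (pvCaps cl) L) (pvU (pvCaps cl) L) = 0 := by omega
        refine ⟨L, le_rfl, hL, Or.inl hlt, ?_⟩
        simp only [hmin]
        exact pvWhileA_nonpos cl fuel _ le_rfl
      · have hge : pvU (pvCaps cl) L ≤ k - pvFilled (pvCaps cl) L := by omega
        have hu : pvU (pvCaps cl) L ≠ 0 := by
          intro hu0
          have := pvFilled_of_u_zero hu0 (le_refl L)
          omega
        have hupos : 0 < pvU (pvCaps cl) L := by
          have := pvU_nonneg (pvCaps cl) L; omega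
        have hsucc := pvFilled_succ (pvCaps cl) L
        have hmin : k - pvFilled (pvCaps cl) L -
            min (k - pvFilled (pvCaps cl) L) (pvU (pvCaps cl) L) =
            k - pvFilled (pvCaps cl) (L + 1) := by omega
        have hfull : pvAssign (pvCaps cl) L (k - pvFilled (pvCaps cl) L) = pvMins cl (L + 1) := by
          rw [pvAssign_full _ _ hge, pvMins_eq]
        simp only [hmin, hfull]
        obtain ⟨Lf, hle, h1, h2, h3⟩ := ih (L + 1) (by omega) hks (by omega)
        exact ⟨Lf, by omega, h1, h2, h3⟩

theorem pvBSearch_spec (cs : List Int) (k : Int) :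
    ∀ (fuel : Nat) (lo hi : Int), (hi - lo).toNat ≤ fuel → lo ≤ hi →
      pvFilled cs lo ≤ k → (k - pvFilled cs hi < pvU cs hi ∨ pvU cs hi = 0) →
      pvFilled cs (pvBSearch cs k fuel lo hi) ≤ k ∧ pvStop cs k (pvBSearch cs k fuel lo hi) := by
  intro fuel
  induction fuel with
  | zero =>
    intro lo hi hfuel hle hlo hhi
    have heq : lo = hi := by omega
    subst heq
    exact ⟨hlo, hhi⟩
  | succ fuel ih =>
    intro lo hi hfuel hle hlo hhi
    rw [pvBSearch]
    by_cases hlh : lo < hi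
    · rw [if_pos hlh]
      have hdm := PySem.Int.floordiv_mul_add_mod (lo + hi + 1) 2
      have hm0 := PySem.Int.mod_nonneg (lo + hi + 1) (by norm_num : (0:Int) < 2)
      have hm1 := PySem.Int.mod_lt (lo + hi + 1) (by norm_num : (0:Int) < 2)
      have hb1 : lo < PySem.Int.floordiv (lo + hi + 1) 2 := by omega
      have hb2 : PySem.Int.floordiv (lo + hi + 1) 2 ≤ hi := by omega
      by_cases hf : pvFilled cs (PySem.Int.floordiv (lo + hi + 1) 2) ≤ k
      · rw [if_pos hf]
        exact ih _ hi (by omega) hb2 hf hhi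
      · rw [if_neg hf]
        have hsucc := pvFilled_succ cs (PySem.Int.floordiv (lo + hi + 1) 2 - 1)
        have : PySem.Int.floordiv (lo + hi + 1) 2 - 1 + 1 =
            PySem.Int.floordiv (lo + hi + 1) 2 := by omega
        rw [this] at hsucc
        exact ih lo _ (by omega) (by omega) hlo (Or.inl (by omega))
    · rw [if_neg hlh]
      have heq : lo = hi := by omega
      subst heq
      exact ⟨hlo, hhi⟩

theorem pvCanon_aux (cs : List Int) (k : Int) {L1 L2 : Int} (hle : L1 ≤ L2)
    (h1 : pvFilled cs L1 ≤ k) (h2 : pvFilled cs L2 ≤ k) (hk : k ≤ cs.sum)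
    (s1 : pvStop cs k L1) :
    pvAssign cs L1 (k - pvFilled cs L1) = pvAssign cs L2 (k - pvFilled cs L2) := by
  rcases eq_or_lt_of_le hle with rfl | hlt
  · rfl
  · have hstep : pvFilled cs (L1 + 1) ≤ pvFilled cs L2 := pvFilled_mono cs (by omega)
    have hsucc := pvFilled_succ cs L1
    have hz : pvU cs L1 = 0 := by
      rcases s1 with h | h
      · omega
      · exact h
    have hs1 : pvFilled cs L1 = cs.sum := pvFilled_of_u_zero hz le_rfl
    have hs2 : pvFilled cs L2 = cs.sum := pvFilled_of_u_zero hz (le_of_lt hlt)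
    rw [pvAssign_nonpos _ _ (by omega : k - pvFilled cs L1 ≤ 0),
        pvAssign_nonpos _ _ (by omega : k - pvFilled cs L2 ≤ 0),
        pvMap_min_of_u_zero hz le_rfl, pvMap_min_of_u_zero hz (le_of_lt hlt)]

-- two stopping levels give the same assignment
theorem pvCanon (cs : List Int) (k : Int) {L1 L2 : Int}
    (h1 : pvFilled cs L1 ≤ k) (h2 : pvFilled cs L2 ≤ k) (hk : k ≤ cs.sum)
    (s1 : pvStop cs k L1) (s2 : pvStop cs k L2) :
    pvAssign cs L1 (k - pvFilled cs L1) = pvAssign cs L2 (k - pvFilled cs L2) := by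
  rcases le_total L1 L2 with h | h
  · exact pvCanon_aux cs k h h1 h2 hk s1
  · exact (pvCanon_aux cs k h h2 h1 hk s2).symm

-- ===== VERDICT (by name: the statement is the Claim_ definition above) =====
theorem get_samples_per_cluster_spec : Claim_equal_get_samples_per_cluster := by
  intro cl k _hdom hpre
  obtain ⟨hne, hk⟩ := hpre
  have hn : (0:Int) < (cl.length : Int) := by
    have := List.length_pos_iff.mpr hne
    exact_mod_cast this
  unfold Spec_get_samples_per_cluster get_samples_per_cluster get_samples_per_cluster_alt
  simp only []
  have hcaps : cl.map (fun c => ((c.length : Nat) : Int)) = pvCaps cl := rfl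
  have hmins : cl.map (fun c => min ((c.length : Nat) : Int)
      (PySem.Int.floordiv k (cl.length : Int))) =
      pvMins cl (PySem.Int.floordiv k (cl.length : Int)) := rfl
  have hsum : ∀ L : Int, (pvMins cl L).sum = pvFilled (pvCaps cl) L := by
    intro L; rw [pvFilled, ← pvMins_eq]
  rw [hcaps, hmins, hsum]
  have hks : k ≤ (pvCaps cl).sum := hk
  -- the initial fill is below k
  have hfb : pvFilled (pvCaps cl) (PySem.Int.floordiv k (cl.length : Int)) ≤ k := by
    have hlen : ((pvCaps cl).length : Int) = (cl.length : Int) := by simp [pvCaps]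
    have hle := pvFilled_le_len_mul (pvCaps cl) (PySem.Int.floordiv k (cl.length : Int))
    rw [hlen] at hle
    have hdm := PySem.Int.floordiv_mul_add_mod k (cl.length : Int)
    have hm0 := PySem.Int.mod_nonneg k hn
    have hcomm : (cl.length : Int) * PySem.Int.floordiv k (cl.length : Int) =
        PySem.Int.floordiv k (cl.length : Int) * (cl.length : Int) := mul_comm _ _
    omega
  -- the top of the binary-search range saturates every cluster
  have hmax := PySem.List.le_foldl_max (pvCaps cl) (PySem.Int.floordiv k (cl.length : Int))
  have hu0 : pvU (pvCaps cl) ((pvCaps cl).foldl max (PySem.Int.floordiv k (cl.length : Int))) = 0 := by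
    simp only [pvU, Int.natCast_eq_zero, List.countP_eq_zero]
    intro a ha
    simp only [decide_eq_true_eq, not_lt]
    exact hmax.2 a ha
  obtain ⟨hfL, hstopL⟩ := pvBSearch_spec (pvCaps cl) k _ _ _ le_rfl hmax.1 hfb (Or.inr hu0)
  obtain ⟨Lf, _, hfLf, hstopf, hres⟩ := pvWhileA_spec cl k _ _ hfb hks le_rfl
  rw [hres]
  exact pvCanon (pvCaps cl) k hfLf hfL hks hstopf hstopL
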